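-- pv_equiv track=rewrite | github.com/Stockoh/My-python-code | math_2.py | list_sum_trong_right
-- ===== SOURCE A (Python) =====
-- def sum_tronq_right(n):
--     """
--     n=abc
--     return abc+bc+c
--     if n=a0c
--     return a0c+c
--     """
--     T=0
--     while True:
--         T+=int(n)
--         if len(str(n))==1:return T
--         n=str(n)[1:]
--
-- def list_sum_trong_right(n):
--     """return a list [m0,m1...] such that m0=abc and m1=def and abc+bc+c=def+ef+f=n"""
--     L=[]
--     r=ilog(n,10)*"8"
--     if r=="":r=0
--     else:r=int(r)
--     for i in range(r,n+1):
--         if sum_tronq_right(i)==n:L.append(i)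
--     return L
--
-- def ilog(x,n):
--     """return a number j such that n^j<=x<n^(j+1)"""
--     if n==0 or x==0:return 0
--     elif n==1 : return 0
--     j=1
--     r=n
--     while True:
--         if r==x:return j
--         elif r>x:return j-1
--         r*=n
--         j+=1
-- ===== SOURCE B (Python) =====
-- def list_sum_trong_right(n):
--     """return a list [m0,m1...] such that m0=abc and m1=def and abc+bc+c=def+ef+f=n"""
--     if n < 0:
--         return []
--     k = len(str(n))
--     out = []
--     for m in range(1, k + 1):
--         weights = [(p + 1) * 10 ** (m - 1 - p) for p in range(m)]
--         first = 1 if m > 1 else 0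
--         out.extend(_solve(weights, n, first, 0))
--     return out
--
-- def _solve(weights, rem, lo, val):
--     """backtracking on the digit equation sum((p+1)*d_p*10^(m-1-p)) = n:
--     choose the digit for weights[0] and recurse on the remaining positions."""
--     if not weights:
--         return [val] if rem == 0 else []
--     if rem > 9 * sum(weights):
--         return []
--     w = weights[0]
--     res = []
--     for d in range(lo, 10):
--         if d * w <= rem:
--             res.extend(_solve(weights[1:], rem - d * w, 0, val * 10 + d))
--     return res
-- ===== Notes on version B (the rewrite author's own statement) =====
-- stated objective: faster
-- what changed: B no longer scans the range [8..8, n] testing each candidate's suffix sum; it solves the digit equation sum over positions p of (p+1)*d_p*10^(m-1-p) = n by pruned backtracking over digit tuples for each possible digit count m, emitting solutions directly in increasing order.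
import Mathlib
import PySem

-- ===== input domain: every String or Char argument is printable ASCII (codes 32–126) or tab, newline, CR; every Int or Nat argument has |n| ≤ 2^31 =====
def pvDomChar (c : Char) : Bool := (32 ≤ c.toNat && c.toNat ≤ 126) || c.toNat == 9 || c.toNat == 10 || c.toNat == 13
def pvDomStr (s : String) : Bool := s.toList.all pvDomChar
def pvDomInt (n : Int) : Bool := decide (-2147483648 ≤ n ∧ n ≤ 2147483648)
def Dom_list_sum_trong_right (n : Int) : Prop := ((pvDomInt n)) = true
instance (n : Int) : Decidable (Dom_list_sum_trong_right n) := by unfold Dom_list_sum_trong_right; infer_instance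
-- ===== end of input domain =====

-- B replaces A's scan of [8..8, n] (testing every candidate's suffix sum) by pruned
-- backtracking on the digit equation Σ_p (p+1)·d_p·10^(m-1-p) = n for each possible
-- digit count m (objective: faster — it explores digit prefixes instead of all candidates).

-- ===== PORT A =====
-- exact hand port of Python's int(s) for the strings it is applied to in this program:
-- nonempty, all characters '0'-'9' (suffixes of str(i) for i ≥ 0, and "8"*k); on those
-- int(s) is the base-10 left fold of the digit values
def pvCharsVal (s : List Char) : Int :=
  s.foldl (fun a c => 10 * a + ((c.toNat : Int) - 48)) 0

-- while-loop of sum_tronq_right once n has become a string; the [] case is a totality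
-- guard only (never reached: the loop returns at length 1)
def pvTronqLoop (s : List Char) (T : Int) : Int :=
  match hs : s with
  | [] => T
  | _ :: _ =>
    let T' := T + pvCharsVal s            -- T += int(n)
    if s.length = 1 then T'
    else pvTronqLoop (PySem.List.slice s (some 1) none) T'   -- n = str(n)[1:]
termination_by s.length
decreasing_by simp [hs, PySem.List.slice_from_one]

def sum_tronq_right (n : Int) : Int :=
  -- first iteration of the while loop: n is still an int, so T += int(n) adds n itself;
  -- afterwards n = str(n)[1:] is a string and the loop continues in pvTronqLoop
  let T := 0 + n
  if (PySem.Int.toChars n).length = 1 then T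
  else pvTronqLoop (PySem.List.slice (PySem.Int.toChars n) (some 1) none) T

-- while-loop of ilog (r grows by factors of n, j counts).  The dite guard only makes the
-- recursion total; at the one call site reached from list_sum_trong_right (the base-ten
-- call of ilog) it always holds, so the port is Python-exact there.
def pvIlogLoop (x n r j : Int) : Int :=
  if r = x then j
  else if r > x then j - 1
  else if h : 2 ≤ n ∧ 0 < r then pvIlogLoop x n (r * n) (j + 1)
  else j
termination_by (x - r).toNat
decreasing_by
  have h2 : r * 2 ≤ r * n := by
    have := mul_le_mul_of_nonneg_left h.1 (le_of_lt h.2)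
    linarith
  omega

def ilog (x n : Int) : Int :=
  if n = 0 ∨ x = 0 then 0
  else if n = 1 then 0
  else pvIlogLoop x n n 1

def list_sum_trong_right (n : Int) : List Int :=
  let rs : List Char := List.replicate (ilog n 10).toNat '8'   -- ilog(n,10)*"8"
  let r : Int := if rs = [] then 0 else pvCharsVal rs          -- int("8"*k), exact: digits only
  (PySem.List.pyRange r (n + 1) 1).foldl
    (fun L i => if sum_tronq_right i = n then L ++ [i] else L) []

-- ===== PORT B =====
-- _solve: backtracking on the digit equation, structural recursion on the weight list
def pvSolve (weights : List Int) (rem : Int) (lo : Int) (val : Int) : List Int :=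
  match weights with
  | [] => if rem = 0 then [val] else []
  | w :: ws =>
    if 9 * (w :: ws).sum < rem then []
    else
      (PySem.List.pyRange lo 10 1).foldl
        (fun res d =>
          if d * w ≤ rem then res ++ pvSolve ws (rem - d * w) 0 (val * 10 + d) else res) []

def list_sum_trong_right_alt (n : Int) : List Int :=
  if n < 0 then []
  else
    let k : Int := ((PySem.Int.toChars n).length : Int)        -- len(str(n))
    (PySem.List.pyRange 1 (k + 1) 1).foldl
      (fun out m =>
        let weights : List Int :=
          (PySem.List.pyRange 0 m 1).map (fun p => (p + 1) * 10 ^ (m - 1 - p).toNat)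
        let first : Int := if 1 < m then 1 else 0
        out ++ pvSolve weights n first 0) []

-- ===== PRECONDITION & SPEC =====
def Spec_list_sum_trong_right (n : Int) (out : List Int) : Prop := out = list_sum_trong_right_alt n
instance (n : Int) (out : List Int) : Decidable (Spec_list_sum_trong_right n out) := by unfold Spec_list_sum_trong_right; infer_instance

-- ===== CLAIM (what is proved, stated in full; the proofs are below) =====
def Claim_equal_list_sum_trong_right : Prop := ∀ (n : Int), Dom_list_sum_trong_right n → Spec_list_sum_trong_right n (list_sum_trong_right n)

-- ===== LEMMAS AND PROOFS =====

-- ---- digits of a nonnegative number ----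
def pvDigits (m : Nat) : List Char :=
  if h : m < 10 then [Nat.digitChar m]
  else pvDigits (m / 10) ++ [Nat.digitChar (m % 10)]
termination_by m
decreasing_by exact Nat.div_lt_self (by omega) (by omega)

lemma pvToDigitsCore_eq (f : Nat) : ∀ (m : Nat) (ds : List Char), m < f →
    Nat.toDigitsCore 10 f m ds = pvDigits m ++ ds := by
  induction f with
  | zero => intro m ds h; omega
  | succ f ih =>
    intro m ds h
    rw [Nat.toDigitsCore]
    by_cases h10 : m < 10
    · have : m / 10 = 0 := Nat.div_eq_of_lt h10
      simp [this, pvDigits, h10, Nat.mod_eq_of_lt h10]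
    · have hne : ¬ m / 10 = 0 := by
        intro hc; exact h10 (by omega)
      simp only [hne, if_false]
      rw [ih (m / 10) _ (by omega)]
      conv_rhs => rw [pvDigits]
      simp [h10, List.append_assoc]

lemma pvToDigits_eq (m : Nat) : Nat.toDigits 10 m = pvDigits m := by
  rw [Nat.toDigits, pvToDigitsCore_eq (m+1) m [] (by omega), List.append_nil]

lemma pvDigits_ne_nil (m : Nat) : pvDigits m ≠ [] := by
  rw [pvDigits]; split <;> simp

lemma pvDigits_length (m : Nat) : (pvDigits m).length = Nat.log 10 m + 1 := by
  induction m using Nat.strong_induction_on with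
  | _ m ih =>
    by_cases h : m < 10
    · rw [pvDigits]; simp [h, Nat.log_eq_zero_iff.mpr (Or.inl h)]
    · have ihd := ih (m / 10) (Nat.div_lt_self (by omega) (by omega))
      have hlog : 1 ≤ Nat.log 10 m := by
        have h1 : (10:Nat)^1 ≤ m := by omega
        exact (Nat.le_log_iff_pow_le (by omega) (by omega)).mpr h1
      rw [pvDigits, dif_neg h]
      simp only [List.length_append, List.length_singleton, ihd, Nat.log_div_base]
      omega

def pvIsDigit (c : Char) : Prop := 48 ≤ c.toNat ∧ c.toNat ≤ 57

lemma pvDigitChar_toNat (d : Nat) (h : d < 10) : (Nat.digitChar d).toNat = d + 48 := by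
  interval_cases d <;> decide

lemma pvDigits_digits (m : Nat) : ∀ c ∈ pvDigits m, pvIsDigit c := by
  induction m using Nat.strong_induction_on with
  | _ m ih =>
    intro c hc
    rw [pvDigits] at hc
    by_cases h : m < 10
    · rw [dif_pos h] at hc
      simp at hc
      subst hc
      constructor <;> rw [pvDigitChar_toNat m h] <;> omega
    · rw [dif_neg h] at hc
      rcases List.mem_append.mp hc with h1 | h2
      · exact ih (m / 10) (Nat.div_lt_self (by omega) (by omega)) c h1
      · simp at h2
        subst h2
        have : m % 10 < 10 := Nat.mod_lt _ (by omega)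
        constructor <;> rw [pvDigitChar_toNat _ this] <;> omega

-- ---- pvCharsVal facts ----
lemma pvCharsVal_go (s : List Char) : ∀ a : Int,
    s.foldl (fun a c => 10 * a + ((c.toNat : Int) - 48)) a
      = a * 10 ^ s.length + pvCharsVal s := by
  induction s with
  | nil => intro a; simp [pvCharsVal]
  | cons c t ih =>
    intro a
    have e1 : pvCharsVal t = t.foldl (fun a c => 10 * a + ((c.toNat : Int) - 48)) 0 := rfl
    have e2 : pvCharsVal (c :: t)
        = t.foldl (fun a c => 10 * a + ((c.toNat : Int) - 48)) (10 * 0 + ((c.toNat : Int) - 48)) := rfl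
    rw [List.foldl_cons, ih, e2, ih, List.length_cons]
    ring

lemma pvCharsVal_cons (c : Char) (t : List Char) :
    pvCharsVal (c :: t) = ((c.toNat : Int) - 48) * 10 ^ t.length + pvCharsVal t := by
  have e2 : pvCharsVal (c :: t)
      = t.foldl (fun a c => 10 * a + ((c.toNat : Int) - 48)) (10 * 0 + ((c.toNat : Int) - 48)) := rfl
  rw [e2, pvCharsVal_go]
  ring

lemma pvCharsVal_bounds (s : List Char) (h : ∀ c ∈ s, pvIsDigit c) :
    0 ≤ pvCharsVal s ∧ pvCharsVal s < 10 ^ s.length := by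
  induction s with
  | nil => simp [pvCharsVal]
  | cons c t ih =>
    have hc := h c (by simp)
    have ht := ih (fun x hx => h x (List.mem_cons_of_mem _ hx))
    rw [pvCharsVal_cons]
    have hd : 0 ≤ (c.toNat : Int) - 48 ∧ (c.toNat : Int) - 48 ≤ 9 := by
      rcases hc with ⟨h1, h2⟩
      omega
    have hp : (0:Int) < 10 ^ t.length := by positivity
    have h9 : ((c.toNat : Int) - 48) * 10 ^ t.length ≤ 9 * 10 ^ t.length :=
      mul_le_mul_of_nonneg_right hd.2 (le_of_lt hp)
    constructor
    · nlinarith [hd.1, ht.1, hp]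
    · rw [List.length_cons]
      have hps : (10:Int) ^ (t.length + 1) = 10 * 10 ^ t.length := by ring
      rw [hps]
      linarith [ht.2, h9]

lemma pvCharsVal_digits (m : Nat) : pvCharsVal (pvDigits m) = (m : Int) := by
  induction m using Nat.strong_induction_on with
  | _ m ih =>
    rw [pvDigits]
    by_cases h : m < 10
    · rw [dif_pos h]
      rw [pvCharsVal_cons]
      simp [pvDigitChar_toNat m h, pvCharsVal]
    · rw [dif_neg h]
      have hmod : m % 10 < 10 := Nat.mod_lt _ (by omega)
      rw [pvCharsVal, List.foldl_append, ← pvCharsVal]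
      rw [List.foldl_cons, List.foldl_nil]
      rw [ih (m / 10) (Nat.div_lt_self (by omega) (by omega))]
      rw [pvDigitChar_toNat _ hmod]
      have : ((m % 10 : Nat) : Int) + 48 - 48 = ((m % 10 : Nat) : Int) := by ring
      push_cast
      omega

-- ---- the arithmetic suffix-sum  pvWk s r = Σ_{t=1}^{s} r mod 10^t ----
def pvWk : Nat → Int → Int
  | 0, _ => 0
  | s+1, r => r % 10 ^ (s+1) + pvWk s r

lemma pvWk_nonneg (s : Nat) (r : Int) : 0 ≤ pvWk s r := by
  induction s with
  | zero => simp [pvWk]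
  | succ s ih =>
    rw [pvWk]
    have : 0 ≤ r % 10 ^ (s+1) := Int.emod_nonneg r (by positivity)
    omega

lemma pvWk_emod (s k : Nat) (r : Int) (h : s ≤ k) : pvWk s (r % 10 ^ k) = pvWk s r := by
  induction s with
  | zero => simp [pvWk]
  | succ s ih =>
    rw [pvWk, pvWk, ih (by omega)]
    have hdvd : ((10:Int) ^ (s+1)) ∣ 10 ^ k := pow_dvd_pow 10 h
    rw [Int.emod_emod_of_dvd r hdvd]

lemma pvWk_succ_self (s : Nat) (r : Int) (h0 : 0 ≤ r) (h1 : r < 10 ^ (s+1)) :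
    pvWk (s+1) r = r + pvWk s r := by
  rw [pvWk, Int.emod_eq_of_lt h0 h1]

lemma pvWk_ge_self (s : Nat) (r : Int) (h0 : 0 ≤ r) (h1 : r < 10 ^ (s+1)) :
    r ≤ pvWk (s+1) r := by
  rw [pvWk_succ_self s r h0 h1]
  have := pvWk_nonneg s r
  omega

-- Σ_{t=1}^{s} (10^t - 1), the largest possible value of pvWk s
def pvSB : Nat → Int
  | 0 => 0
  | s+1 => pvSB s + (10 ^ (s+1) - 1)

lemma pvWk_le_SB (s : Nat) (r : Int) : pvWk s r ≤ pvSB s := by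
  induction s with
  | zero => simp [pvWk, pvSB]
  | succ s ih =>
    rw [pvWk, pvSB]
    have : r % 10 ^ (s+1) < 10 ^ (s+1) := Int.emod_lt_of_pos r (by positivity)
    omega

lemma pvSB_nine (s : Nat) : 9 * pvSB s ≤ 10 ^ (s+1) - 10 := by
  induction s with
  | zero => simp [pvSB]
  | succ s ih =>
    rw [pvSB]
    have h10 : (10:Int) ^ (s+1+1) = 10 * 10 ^ (s+1) := by ring
    nlinarith [one_le_pow₀ (M₀ := Int) (n := s+1) (a := 10) (by omega)]

lemma pvSB_mono (s t : Nat) (h : s ≤ t) : pvSB s ≤ pvSB t := by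
  induction t with
  | zero => interval_cases s; rfl
  | succ t ih =>
    rcases Nat.lt_or_ge s (t+1) with h1 | h1
    · have := ih (by omega)
      rw [pvSB]
      have : (1:Int) ≤ 10 ^ (t+1) := one_le_pow₀ (by omega)
      omega
    · have : s = t + 1 := by omega
      subst this; rfl

lemma pvWk_le (s : Nat) (r : Int) (h0 : 0 ≤ r) (h1 : r < 10 ^ (s+1)) :
    pvWk (s+1) r ≤ r + pvSB s := by
  rw [pvWk_succ_self s r h0 h1]
  have := pvWk_le_SB s r
  omega

-- ---- the string loop computes pvWk ----
lemma pvTronqLoop_wk (s : List Char) : s ≠ [] → (∀ c ∈ s, pvIsDigit c) → ∀ T : Int,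
    pvTronqLoop s T = T + pvWk s.length (pvCharsVal s) := by
  induction s with
  | nil => intro h; exact absurd rfl h
  | cons c t ih =>
    intro _ hdig T
    have hv := pvCharsVal_bounds (c :: t) hdig
    rw [pvTronqLoop]
    by_cases h1 : (c :: t).length = 1
    · have : t = [] := by cases t <;> simp_all
      subst this
      simp only [if_pos h1]
      rw [h1, pvWk, pvWk]
      rw [Int.emod_eq_of_lt hv.1 (by simpa using hv.2)]
      ring
    · have htne : t ≠ [] := by cases t <;> simp_all
      rw [if_neg h1, PySem.List.slice_from_one, List.tail_cons]
      rw [ih htne (fun x hx => hdig x (List.mem_cons_of_mem _ hx))]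
      have htd := pvCharsVal_bounds t (fun x hx => hdig x (List.mem_cons_of_mem _ hx))
      have htail : pvCharsVal t = pvCharsVal (c :: t) % 10 ^ t.length := by
        rw [pvCharsVal_cons, add_comm, mul_comm, Int.add_mul_emod_self_left]
        exact (Int.emod_eq_of_lt htd.1 htd.2).symm
      rw [htail, pvWk_emod t.length t.length _ (le_refl _)]
      rw [List.length_cons, pvWk_succ_self t.length _ hv.1 (by simpa using hv.2)]
      ring

lemma pvToChars_nonneg (n : Int) (h : 0 ≤ n) :
    PySem.Int.toChars n = pvDigits n.toNat := by
  rw [PySem.Int.toChars, if_neg (by omega), pvToDigits_eq]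

lemma pvLen_toChars (n : Int) (hn : 0 ≤ n) :
    (PySem.Int.toChars n).length = Nat.log 10 n.toNat + 1 := by
  rw [pvToChars_nonneg n hn, pvDigits_length]

-- digit count of i, as used everywhere below
def pvL (i : Int) : Nat := Nat.log 10 i.toNat + 1

lemma pvL_bounds (i : Int) (h : 0 ≤ i) : i < 10 ^ pvL i := by
  have h1 := Nat.lt_pow_succ_log_self (b := 10) (by omega) i.toNat
  have h2 : (i.toNat : Int) < ((10 ^ (Nat.log 10 i.toNat + 1) : Nat) : Int) := by exact_mod_cast h1
  rw [Int.toNat_of_nonneg h] at h2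
  rw [pvL]
  push_cast at h2
  exact h2

lemma pvL_lower (i : Int) (h : 1 ≤ i) : 10 ^ (pvL i - 1) ≤ i := by
  have h1 := Nat.pow_log_le_self 10 (x := i.toNat) (by omega)
  have h2 : ((10 ^ Nat.log 10 i.toNat : Nat) : Int) ≤ (i.toNat : Int) := by exact_mod_cast h1
  rw [Int.toNat_of_nonneg (by omega : (0:Int) ≤ i)] at h2
  push_cast at h2
  rw [pvL, Nat.add_sub_cancel]
  exact h2

lemma pvL_of_block (i : Int) (s : Nat) (h1 : 10 ^ s ≤ i) (h2 : i < 10 ^ (s+1)) :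
    pvL i = s + 1 := by
  rw [pvL]
  have h0 : 0 ≤ i := le_trans (by positivity) h1
  have ha : (10:Nat) ^ s ≤ i.toNat := by
    have : ((10 ^ s : Nat) : Int) ≤ i := by exact_mod_cast h1
    omega
  have hb : i.toNat < (10:Nat) ^ (s+1) := by
    have : i < ((10 ^ (s+1) : Nat) : Int) := by exact_mod_cast h2
    omega
  rw [Nat.log_eq_of_pow_le_of_lt_pow ha hb]

-- the A-side test in arithmetic form
lemma pvSum_eq_wk (i : Int) (h : 0 ≤ i) : sum_tronq_right i = pvWk (pvL i) i := by
  have hchars : PySem.Int.toChars i = pvDigits i.toNat := pvToChars_nonneg i h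
  have hlen : (PySem.Int.toChars i).length = pvL i := by
    rw [pvLen_toChars i h]; rfl
  have hval : pvCharsVal (PySem.Int.toChars i) = i := by
    rw [hchars, pvCharsVal_digits]; omega
  have hdig : ∀ c ∈ PySem.Int.toChars i, pvIsDigit c := by
    rw [hchars]; exact pvDigits_digits i.toNat
  have hib : i < 10 ^ pvL i := pvL_bounds i h
  rw [sum_tronq_right]
  by_cases h1 : (PySem.Int.toChars i).length = 1
  · simp only [if_pos h1]
    have : pvL i = 1 := by omega
    rw [this, pvWk, pvWk]
    have : i < 10 ^ 1 := by rw [← this]; exact hib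
    rw [Int.emod_eq_of_lt h (by simpa using this)]
    ring
  · simp only [if_neg h1]
    have hne : PySem.Int.toChars i ≠ [] := by
      rw [hchars]; exact pvDigits_ne_nil _
    obtain ⟨c, t, hct⟩ : ∃ c t, PySem.Int.toChars i = c :: t := by
      cases hx : PySem.Int.toChars i with
      | nil => exact absurd hx hne
      | cons c t => exact ⟨c, t, rfl⟩
    have htne : t ≠ [] := by
      intro hc; rw [hct, hc] at h1; simp at h1
    rw [hct, PySem.List.slice_from_one, List.tail_cons]
    rw [pvTronqLoop_wk t htne (fun x hx => by
      have := hdig x; rw [hct] at this; exact this (List.mem_cons_of_mem _ hx))]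
    have hvt : pvCharsVal t = i % 10 ^ t.length := by
      have hvct : pvCharsVal (c :: t) = i := by rw [← hct]; exact hval
      have htd := pvCharsVal_bounds t (fun x hx => by
        have := hdig x; rw [hct] at this; exact this (List.mem_cons_of_mem _ hx))
      rw [← hvct, pvCharsVal_cons, add_comm, mul_comm, Int.add_mul_emod_self_left]
      exact (Int.emod_eq_of_lt htd.1 htd.2).symm
    have hlt : t.length + 1 = pvL i := by
      rw [← hlen, hct]; simp
    rw [hvt, pvWk_emod t.length t.length _ (le_refl _)]
    have : pvL i = t.length + 1 := hlt.symm
    rw [this, pvWk_succ_self t.length i h (by rw [← this]; exact hib)]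
    ring

-- ---- ilog and the all-8s start value ----
lemma pvIlogLoop_log (x : Int) (hx : 1 ≤ x) : ∀ (e : Nat), (10 : Int) ^ e ≤ x →
    pvIlogLoop x 10 ((10 : Int) ^ (e + 1)) ((e : Int) + 1) = (Nat.log 10 x.toNat : Int) := by
  intro e he
  have hxt : ((x.toNat : Int)) = x := Int.toNat_of_nonneg (by omega)
  have hcast : ∀ m : Nat, (((10:Nat)^m : Nat) : Int) = (10:Int)^m := by intro m; push_cast; ring
  rw [pvIlogLoop]
  split_ifs with heq hgt hguard
  · have hx1 : x.toNat = 10 ^ (e + 1) := by have := hcast (e+1); omega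
    rw [hx1, Nat.log_pow (by norm_num)]
    push_cast; ring
  · have h1 : (10:Nat) ^ e ≤ x.toNat := by have := hcast e; omega
    have h2 : x.toNat < (10:Nat) ^ (e + 1) := by have := hcast (e+1); omega
    rw [Nat.log_eq_of_pow_le_of_lt_pow h1 h2]
    ring
  · have hlt : (10 : Int) ^ (e + 1) < x := by omega
    have h10 : (10 : Int) ^ (e + 1) * 10 = (10 : Int) ^ (e + 1 + 1) := by ring
    have hj : ((e : Int) + 1 + 1) = (((e + 1 : Nat) : Int) + 1) := by push_cast; ring
    rw [h10, hj]
    exact pvIlogLoop_log x hx (e + 1) (le_of_lt hlt)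
  · exact absurd ⟨by norm_num, by positivity⟩ hguard
termination_by e => (Nat.log 10 x.toNat + 1) - e
decreasing_by
  have hc : (((10:Nat)^(e+1) : Nat) : Int) = (10:Int)^(e+1) := by push_cast; ring
  have h1 : (10:Nat) ^ (e+1) ≤ x.toNat := by omega
  have : e + 1 ≤ Nat.log 10 x.toNat :=
    (Nat.le_log_iff_pow_le (by omega) (by omega)).mpr h1
  omega

lemma pvIlog_eq (n : Int) (hn : 1 ≤ n) : ilog n 10 = (Nat.log 10 n.toNat : Int) := by
  rw [ilog, if_neg (by omega), if_neg (by norm_num)]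
  have h := pvIlogLoop_log n hn 0 (by norm_num [hn])
  norm_num at h
  exact h

-- value of the all-8s string of length j
def pvE (j : Nat) : Int := pvCharsVal (List.replicate j '8')

lemma pvE_facts (j : Nat) : 9 * pvE j = 8 * (10 ^ j - 1) ∧ 0 ≤ pvE j := by
  induction j with
  | zero => simp [pvE, pvCharsVal]
  | succ j ih =>
    have hstep : pvE (j+1) = 8 * 10 ^ j + pvE j := by
      rw [pvE, List.replicate_succ, pvCharsVal_cons, List.length_replicate, ← pvE]
      have h8 : ((('8').toNat : Int) - 48) = 8 := by decide
      rw [h8]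
    constructor
    · rw [hstep]; rcases ih with ⟨h1, _⟩; ring_nf; ring_nf at h1; linarith
    · rw [hstep]
      have : (0:Int) ≤ 10 ^ j := by positivity
      rcases ih with ⟨_, h2⟩
      omega

-- ---- solver spec ----
-- the weight list of positions pos..pos+s-1 in an (pos+s)-digit number
def pvWF (pos : Int) (s : Nat) : List Int :=
  (List.range s).map (fun (j : Nat) => (pos + 1 + (j : Int)) * 10 ^ (s - 1 - j))

lemma pvWF_cons (pos : Int) (s : Nat) :
    pvWF pos (s+1) = ((pos + 1) * 10 ^ s) :: pvWF (pos + 1) s := by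
  rw [pvWF, pvWF, List.range_succ_eq_map]
  simp only [List.map_cons, List.map_map]
  congr 1
  · norm_num
  · apply List.map_congr_left
    intro j hj
    simp only [Function.comp_apply]
    have h1 : (s + 1) - 1 - (j + 1) = s - 1 - j := by omega
    have h2 : ((j + 1 : Nat) : Int) = (j : Int) + 1 := by push_cast; ring
    rw [h1, h2]
    ring

-- maximal value of the remaining weighted digit sum
lemma pvWF_max (s : Nat) : ∀ (pos r : Int), 0 ≤ pos → 0 ≤ r → r < 10 ^ s →
    pos * r + pvWk s r ≤ 9 * (pvWF pos s).sum := by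
  induction s with
  | zero =>
    intro pos r _ h0 h1
    have : r = 0 := by omega
    simp [this, pvWk, pvWF]
  | succ s ih =>
    intro pos r hpos h0 h1
    have hB : (0:Int) < 10 ^ s := by positivity
    set d := r / 10 ^ s with hd
    set r' := r % 10 ^ s with hr'
    have hdec : r = d * 10 ^ s + r' := by
      have h := Int.ediv_add_emod r (10 ^ s)
      rw [hd, hr']
      linarith
    have hd0 : 0 ≤ d := Int.ediv_nonneg h0 (le_of_lt hB)
    have hd9 : d ≤ 9 := by
      by_cases h : d ≤ 9
      · exact h
      · exfalso
        rw [not_le] at h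
        have h10 : (10:Int) * 10 ^ s ≤ d * 10 ^ s := by nlinarith
        have hps : (10:Int) ^ (s+1) = 10 * 10 ^ s := by ring
        have hrnn : 0 ≤ r' := Int.emod_nonneg r (by positivity)
        omega
    have hr'0 : 0 ≤ r' := Int.emod_nonneg r (by positivity)
    have hr'1 : r' < 10 ^ s := Int.emod_lt_of_pos r hB
    have hwk : pvWk (s+1) r = r + pvWk s r' := by
      rw [pvWk_succ_self s r h0 h1, hr', pvWk_emod s s r (le_refl _)]
    have hih := ih (pos + 1) r' (by omega) hr'0 hr'1
    have hkey : pos * r + pvWk (s+1) r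
        = d * ((pos + 1) * 10 ^ s) + ((pos + 1) * r' + pvWk s r') := by
      rw [hwk]
      conv_lhs => rw [hdec]
      ring
    have hd' : d * ((pos + 1) * 10 ^ s) ≤ 9 * ((pos + 1) * 10 ^ s) := by
      apply mul_le_mul_of_nonneg_right hd9
      positivity
    rw [pvWF_cons, List.sum_cons, hkey]
    linarith [hih, hd']
  
-- helper list lemmas
lemma pvFilter_flatMap {α β : Type} (l : List α) (g : α → List β) (p : β → Bool) :
    (l.flatMap g).filter p = l.flatMap (fun x => (g x).filter p) := by
  induction l with
  | nil => rfl
  | cons a t ih => simp [List.flatMap_cons, List.filter_append, ih]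

lemma pvMap_flatMap {α β γ : Type} (l : List α) (g : α → List β) (f : β → γ) :
    (l.flatMap g).map f = l.flatMap (fun x => (g x).map f) := by
  induction l with
  | nil => rfl
  | cons a t ih => simp [List.flatMap_cons, ih]

lemma pvFlatMap_congr {α β : Type} (l : List α) (f g : α → List β)
    (h : ∀ x ∈ l, f x = g x) : l.flatMap f = l.flatMap g := by
  induction l with
  | nil => rfl
  | cons a t ih =>
    simp only [List.flatMap_cons]
    rw [h a (by simp), ih (fun x hx => h x (by simp [hx]))]

-- decomposition of a contiguous range into digit blocks
lemma pvBlocks : ∀ (k : Nat) (lo T B : Int), 0 < B → 0 ≤ lo → lo ≤ T → T - lo = (k : Int) →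
    PySem.List.pyRange (lo * B) (T * B) 1
      = (PySem.List.pyRange lo T 1).flatMap
          (fun d => PySem.List.pyRange (d * B) ((d + 1) * B) 1) := by
  intro k
  induction k with
  | zero =>
    intro lo T B hB hlo hloT hk
    have : lo = T := by omega
    subst this
    rw [PySem.List.pyRange_one_eq_nil (by nlinarith), PySem.List.pyRange_one_eq_nil (le_refl _)]
    rfl
  | succ k ih =>
    intro lo T B hB hlo hloT hk
    have hlt : lo < T := by omega
    rw [PySem.List.pyRange_one_cons hlt, List.flatMap_cons]
    rw [← ih (lo + 1) T B hB (by omega) (by omega) (by push_cast; omega)]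
    rw [← PySem.List.pyRange_one_append (lo * B) ((lo + 1) * B) (T * B)
          (by nlinarith) (by nlinarith)]

lemma pvBlock_map (d B : Int) :
    PySem.List.pyRange (d * B) ((d + 1) * B) 1
      = (PySem.List.pyRange 0 B 1).map (fun r' => d * B + r') := by
  rw [PySem.List.pyRange_one, PySem.List.pyRange_one, List.map_map]
  have h1 : ((d + 1) * B - d * B) = B := by ring
  have h2 : (B - (0:Int)) = B := by ring
  rw [h1, h2]
  apply List.map_congr_left
  intro j hj
  simp

-- the key algebraic identity behind the backtracking step
lemma pvKey (pos d r' : Int) (s : Nat) (hd0 : 0 ≤ d) (hd9 : d ≤ 9)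
    (hr0 : 0 ≤ r') (hr1 : r' < 10 ^ s) :
    pos * (d * 10 ^ s + r') + pvWk (s+1) (d * 10 ^ s + r')
      = d * ((pos + 1) * 10 ^ s) + ((pos + 1) * r' + pvWk s r') := by
  have hp : (0:Int) < 10 ^ s := by positivity
  have hnn : 0 ≤ d * 10 ^ s := mul_nonneg hd0 (le_of_lt hp)
  have hub : d * 10 ^ s ≤ 9 * 10 ^ s := mul_le_mul_of_nonneg_right hd9 (le_of_lt hp)
  have hps : (10:Int) ^ (s+1) = 10 * 10 ^ s := by ring
  have hlt : d * 10 ^ s + r' < 10 ^ (s+1) := by rw [hps]; linarith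
  rw [pvWk_succ_self s _ (by linarith) hlt]
  have h1 : (d * 10 ^ s + r') % 10 ^ s = r' := by
    rw [add_comm, mul_comm, Int.add_mul_emod_self_left]
    exact Int.emod_eq_of_lt hr0 hr1
  have hmod : pvWk s (d * 10 ^ s + r') = pvWk s r' := by
    rw [← pvWk_emod s s (d * 10 ^ s + r') (le_refl _), h1]
  rw [hmod]
  ring

-- the central lemma: the backtracking solver enumerates exactly the r in
-- [lo·10^(s-1), 10^s) with pos·r + pvWk s r = rem, in increasing order
lemma pvSolve_spec (s : Nat) : ∀ (pos rem lo val : Int), 0 ≤ pos → 0 ≤ lo → lo ≤ 9 →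
    (s = 0 → lo = 0) →
    pvSolve (pvWF pos s) rem lo val
      = ((PySem.List.pyRange (lo * 10 ^ (s-1)) (10 ^ s) 1).filter
          (fun r => decide (pos * r + pvWk s r = rem))).map (fun r => val * 10 ^ s + r) := by
  induction s with
  | zero =>
    intro pos rem lo val hpos hlo0 hlo9 hs0
    rw [hs0 rfl]
    have h01 : PySem.List.pyRange ((0:Int) * 10 ^ (0-1)) (10 ^ 0) 1 = [0] := by decide
    have hWF : pvWF pos 0 = [] := by rw [pvWF]; simp
    rw [hWF, h01, pvSolve]
    by_cases h : rem = 0 <;> simp [h, pvWk, eq_comm]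
  | succ s ih =>
    intro pos rem lo val hpos hlo0 hlo9 _
    have hB : (0:Int) < 10 ^ s := by positivity
    have hps : (10:Int) ^ (s+1) = 10 * 10 ^ s := by ring
    rw [pvWF_cons]
    show (if 9 * (((pos + 1) * 10 ^ s) :: pvWF (pos + 1) s).sum < rem then []
      else (PySem.List.pyRange lo 10 1).foldl
        (fun res d => if d * ((pos + 1) * 10 ^ s) ≤ rem
          then res ++ pvSolve (pvWF (pos + 1) s) (rem - d * ((pos + 1) * 10 ^ s)) 0 (val * 10 + d)
          else res) []) = _
    by_cases hprune : 9 * (((pos + 1) * 10 ^ s) :: pvWF (pos + 1) s).sum < rem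
    · rw [if_pos hprune]
      have hnil : ((PySem.List.pyRange (lo * 10 ^ (s+1-1)) (10 ^ (s+1)) 1).filter
          (fun r => decide (pos * r + pvWk (s+1) r = rem))) = [] := by
        rw [List.filter_eq_nil_iff]
        intro r hr
        rw [PySem.List.mem_pyRange_one] at hr
        have hr0 : 0 ≤ r := le_trans (by positivity) hr.1
        have hmax := pvWF_max (s+1) pos r hpos hr0 hr.2
        rw [pvWF_cons] at hmax
        simp only [decide_eq_true_eq]
        omega
      rw [hnil]
      rfl
    · rw [if_neg hprune]
      have hshape : (fun (res : List Int) (d : Int) => if d * ((pos + 1) * 10 ^ s) ≤ rem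
            then res ++ pvSolve (pvWF (pos + 1) s) (rem - d * ((pos + 1) * 10 ^ s)) 0 (val * 10 + d)
            else res)
          = (fun res d => res ++ (if d * ((pos + 1) * 10 ^ s) ≤ rem
            then pvSolve (pvWF (pos + 1) s) (rem - d * ((pos + 1) * 10 ^ s)) 0 (val * 10 + d)
            else [])) := by
        funext res d
        split_ifs <;> simp
      rw [hshape, PySem.List.foldl_append_eq_flatMap, List.nil_append]
      -- right-hand side: split the range into digit blocks
      have hsub : s + 1 - 1 = s := rfl
      rw [hsub]
      have hTB : (10:Int) ^ (s+1) = 10 * 10 ^ s := hps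
      rw [hTB]
      rw [pvBlocks (10 - lo).toNat lo 10 (10 ^ s) hB hlo0 (by omega) (by omega)]
      rw [pvFilter_flatMap, pvMap_flatMap]
      apply pvFlatMap_congr
      intro d hd
      rw [PySem.List.mem_pyRange_one] at hd
      rw [pvBlock_map, List.filter_map, List.map_map]
      by_cases hguard : d * ((pos + 1) * 10 ^ s) ≤ rem
      · rw [if_pos hguard]
        rw [ih (pos + 1) (rem - d * ((pos + 1) * 10 ^ s)) 0 (val * 10 + d)
              (by omega) (le_refl 0) (by omega) (fun _ => rfl)]
        rw [zero_mul]
        congr 1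
        · funext r'
          simp only [Function.comp_apply]
          ring
        · apply List.filter_congr
          intro r' hr'
          rw [PySem.List.mem_pyRange_one] at hr'
          simp only [Function.comp_apply]
          rw [pvKey pos d r' s (by omega) (by omega) hr'.1 hr'.2, decide_eq_decide]
          constructor
          · intro h; omega
          · intro h; omega
      · rw [if_neg hguard]
        have : ((PySem.List.pyRange 0 (10 ^ s) 1).filter
            ((fun r => decide (pos * r + pvWk (s+1) r = rem)) ∘ (fun r' => d * 10 ^ s + r'))) = [] := by
          rw [List.filter_eq_nil_iff]
          intro r' hr'
          rw [PySem.List.mem_pyRange_one] at hr'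
          simp only [Function.comp_apply, decide_eq_true_eq]
          rw [pvKey pos d r' s (by omega) (by omega) hr'.1 hr'.2]
          have h1 : 0 ≤ (pos + 1) * r' := mul_nonneg (by omega) hr'.1
          have h2 := pvWk_nonneg s r'
          omega
        rw [this]
        rfl

-- pvL is ≥ 1, and constant on digit blocks
lemma pvL_one (i : Int) (h0 : 0 ≤ i) (h1 : i < 10) : pvL i = 1 := by
  rw [pvL]
  have : i.toNat < 10 := by omega
  rw [Nat.log_eq_zero_iff.mpr (Or.inl this)]

-- a value above n is never a solution
lemma pvWk_gt (i n : Int) (h0 : 0 ≤ i) (hgt : n < i) : pvWk (pvL i) i ≠ n := by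
  have hb := pvL_bounds i h0
  have h1 : pvL i = Nat.log 10 i.toNat + 1 := rfl
  rw [h1] at hb ⊢
  have := pvWk_ge_self (Nat.log 10 i.toNat) i h0 hb
  omega

-- a value below the all-8s start is never a solution
lemma pvBelowStart (n i : Int) (hn1 : 1 ≤ n) (h0 : 0 ≤ i)
    (hi : i < pvE (pvL n - 1)) : pvWk (pvL i) i ≠ n := by
  set k := pvL n with hk
  have hk1 : 1 ≤ k := by rw [hk, pvL]; omega
  by_cases hke : k = 1
  · exfalso
    rw [hke] at hi
    have : pvE 0 = 0 := by decide
    rw [this] at hi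
    omega
  · have hk2 : 2 ≤ k := by omega
    have hnl : (10:Int) ^ (k - 1) ≤ n := pvL_lower n hn1
    have hE := pvE_facts (k-1)
    have hone : (1:Int) ≤ 10 ^ (k-1) := one_le_pow₀ (by omega)
    have hElt : 9 * pvE (k-1) ≤ 9 * (10 ^ (k-1) - 1) := by
      rw [hE.1]; linarith
    -- digit count of i
    have hm1 : 1 ≤ pvL i := by rw [pvL]; omega
    have hmk : pvL i ≤ k - 1 := by
      by_cases hiz : i = 0
      · rw [hiz]
        have : pvL 0 = 1 := by decide
        rw [this]; omega
      · have hi1 : 1 ≤ i := by omega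
        have hlow := pvL_lower i hi1
        by_contra hc
        have hge : k - 1 ≤ pvL i - 1 := by omega
        have : (10:Int) ^ (k-1) ≤ 10 ^ (pvL i - 1) :=
          pow_le_pow_right₀ (by omega) hge
        omega
    obtain ⟨t, ht⟩ : ∃ t, pvL i = t + 1 := ⟨pvL i - 1, by omega⟩
    have hib : i < 10 ^ pvL i := pvL_bounds i h0
    rw [ht] at hib
    have hle := pvWk_le t i h0 hib
    have hSB : pvSB t ≤ pvSB (k-2) := pvSB_mono t (k-2) (by omega)
    have hSB9 : 9 * pvSB (k-2) ≤ 10 ^ (k-2+1) - 10 := pvSB_nine (k-2)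
    have hkk : k - 2 + 1 = k - 1 := by omega
    rw [hkk] at hSB9
    rw [ht]
    -- 9·pvWk ≤ 9 i + 9 SB ≤ 9(E-1) + 10^{k-1} - 10 < 9·10^{k-1} ≤ 9 n
    intro hcon
    have h9 : 9 * pvWk (t+1) i ≤ 9 * i + 9 * pvSB t := by linarith
    omega

-- the weight list computed by the B port is pvWF 0 m.toNat
lemma pvWeights_eq (m : Int) (hm : 0 ≤ m) :
    (PySem.List.pyRange 0 m 1).map (fun p => (p + 1) * 10 ^ (m - 1 - p).toNat)
      = pvWF 0 m.toNat := by
  rw [PySem.List.pyRange_one, pvWF, List.map_map]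
  have h0 : ((m : Int) - 0).toNat = m.toNat := by omega
  rw [h0]
  apply List.map_congr_left
  intro j hj
  have hjm : j < m.toNat := List.mem_range.mp hj
  simp only [Function.comp_apply]
  have h2 : (m - 1 - ((0:Int) + (j:Int))).toNat = m.toNat - 1 - j := by omega
  rw [h2, show ((0:Int) + (j:Int) + 1) = 0 + 1 + (j:Int) from by ring]

-- one branch of the B port, in filter form
lemma pvBranch (n m : Int) (hm : 1 ≤ m) :
    pvSolve ((PySem.List.pyRange 0 m 1).map (fun p => (p + 1) * 10 ^ (m - 1 - p).toNat))
        n (if 1 < m then 1 else 0) 0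
      = (PySem.List.pyRange ((if 1 < m then (1:Int) else 0) * 10 ^ (m.toNat - 1)) (10 ^ m.toNat) 1).filter
          (fun r => decide (pvWk m.toNat r = n)) := by
  rw [pvWeights_eq m (by omega)]
  have hlo0 : (0:Int) ≤ (if 1 < m then (1:Int) else 0) := by split_ifs <;> omega
  have hlo9 : (if 1 < m then (1:Int) else 0) ≤ 9 := by split_ifs <;> omega
  have hs0 : m.toNat = 0 → (if 1 < m then (1:Int) else 0) = 0 := by
    intro h; omega
  rw [pvSolve_spec m.toNat 0 n (if 1 < m then (1:Int) else 0) 0 (le_refl 0) hlo0 hlo9 hs0]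
  have hmap : (fun (r : Int) => (0:Int) * 10 ^ m.toNat + r) = id := by
    funext r; simp
  rw [hmap, List.map_id]
  apply List.filter_congr
  intro r _
  simp

-- union of the digit blocks m = 1..j  =  the contiguous range [0, 10^j)
lemma pvUnion (n : Int) : ∀ (j : Nat), 1 ≤ j →
    (PySem.List.pyRange 1 ((j:Int) + 1) 1).flatMap
        (fun m => (PySem.List.pyRange ((if 1 < m then (1:Int) else 0) * 10 ^ (m.toNat - 1)) (10 ^ m.toNat) 1).filter
          (fun r => decide (pvWk m.toNat r = n)))
      = (PySem.List.pyRange 0 (10 ^ j) 1).filter (fun i => decide (pvWk (pvL i) i = n)) := by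
  intro j
  induction j with
  | zero => omega
  | succ j ih =>
    intro _
    by_cases hj : j = 0
    · subst hj
      have h12 : PySem.List.pyRange 1 (((1:Nat):Int) + 1) 1 = [1] := by decide
      rw [h12]
      simp only [List.flatMap_cons, List.flatMap_nil, List.append_nil]
      have : (if (1:Int) < 1 then (1:Int) else 0) = 0 := by norm_num
      rw [this, zero_mul]
      have htn : ((1:Int)).toNat = 1 := rfl
      rw [htn]
      apply List.filter_congr
      intro r hr
      rw [PySem.List.mem_pyRange_one] at hr
      have : pvL r = 1 := pvL_one r hr.1 (by simpa using hr.2)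
      rw [this]
    · have hj1 : 1 ≤ j := by omega
      have hcast : ((j:Int) + 1) = (((j+1:Nat)):Int) := by push_cast; ring
      have hsplit : PySem.List.pyRange 1 (((j+1:Nat):Int) + 1) 1
          = PySem.List.pyRange 1 ((j:Int) + 1) 1 ++ [((j:Int) + 1)] := by
        rw [← hcast]
        exact PySem.List.pyRange_one_succ_right (by omega)
      rw [hsplit, List.flatMap_append, ih hj1]
      simp only [List.flatMap_cons, List.flatMap_nil, List.append_nil]
      have hm2 : (1:Int) < (j:Int) + 1 := by omega
      rw [if_pos hm2]
      have htn : ((j:Int) + 1).toNat = j + 1 := by omega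
      rw [htn, one_mul]
      have hpowle : (10:Int) ^ j ≤ 10 ^ (j+1) := by
        apply pow_le_pow_right₀ <;> omega
      have hpow0 : (0:Int) ≤ 10 ^ j := by positivity
      rw [Nat.add_sub_cancel]
      have hrange : PySem.List.pyRange 0 (10 ^ (j+1)) 1
          = PySem.List.pyRange 0 (10 ^ j) 1 ++ PySem.List.pyRange (10 ^ j) (10 ^ (j+1)) 1 :=
        PySem.List.pyRange_one_append 0 (10 ^ j) (10 ^ (j+1)) hpow0 hpowle
      rw [hrange, List.filter_append]
      congr 1
      apply List.filter_congr
      intro r hr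
      rw [PySem.List.mem_pyRange_one] at hr
      have : pvL r = j + 1 := pvL_of_block r j hr.1 hr.2
      rw [this]

-- A in filter form
lemma pvA_filter (n : Int) :
    list_sum_trong_right n
      = (PySem.List.pyRange (pvE ((ilog n 10).toNat)) (n + 1) 1).filter
          (fun i => decide (sum_tronq_right i = n)) := by
  have hstart : (if (List.replicate (ilog n 10).toNat '8' : List Char) = [] then (0:Int)
      else pvCharsVal (List.replicate (ilog n 10).toNat '8')) = pvE ((ilog n 10).toNat) := by
    by_cases h : (ilog n 10).toNat = 0
    · rw [h]
      simp [pvE, pvCharsVal]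
    · rw [if_neg (by simp [h])]
      rfl
  simp only [list_sum_trong_right]
  rw [hstart, PySem.List.foldl_append_ite_eq_filter, List.nil_append]

-- the start index of A equals pvE (pvL n - 1) for n ≥ 0
lemma pvIlog_toNat (n : Int) (hn : 0 ≤ n) : (ilog n 10).toNat = pvL n - 1 := by
  by_cases h : n = 0
  · subst h
    have h1 : ilog 0 10 = 0 := by rw [ilog, if_pos (Or.inr rfl)]
    rw [h1]
    decide
  · have h1 : ilog n 10 = (Nat.log 10 n.toNat : Int) := pvIlog_eq n (by omega)
    rw [h1, pvL]
    omega

-- ===== the main equivalence =====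
theorem pvMain (n : Int) : list_sum_trong_right n = list_sum_trong_right_alt n := by
  rcases lt_or_ge n 0 with hn | hn
  · -- n < 0: both sides are empty
    rw [list_sum_trong_right_alt, if_pos hn]
    rw [pvA_filter]
    have hilog : ilog n 10 = 0 := by
      rw [ilog, if_neg (by omega), if_neg (by norm_num), pvIlogLoop]
      rw [if_neg (by omega), if_pos (by omega)]
      norm_num
    rw [hilog]
    have : pvE ((0:Int).toNat) = 0 := by decide
    rw [this, PySem.List.pyRange_one_eq_nil (by omega)]
    rfl
  · -- n ≥ 0
    set k : Nat := pvL n with hkdef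
    have hk1 : 1 ≤ k := by rw [hkdef, pvL]; omega
    have hnk : n < 10 ^ k := pvL_bounds n hn
    -- the B side
    rw [list_sum_trong_right_alt, if_neg (by omega)]
    have hklen : ((PySem.Int.toChars n).length : Int) = (k : Int) := by
      rw [pvLen_toChars n hn]
      rfl
    rw [hklen]
    rw [PySem.List.foldl_append_eq_flatMap
        (g := fun m => pvSolve ((PySem.List.pyRange 0 m 1).map
              (fun p => (p + 1) * 10 ^ (m - 1 - p).toNat)) n (if 1 < m then 1 else 0) 0),
        List.nil_append]
    have hbranches := pvFlatMap_congr (PySem.List.pyRange 1 ((k:Int) + 1) 1)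
        (fun m => pvSolve ((PySem.List.pyRange 0 m 1).map
              (fun p => (p + 1) * 10 ^ (m - 1 - p).toNat)) n (if 1 < m then 1 else 0) 0)
        (fun m => (PySem.List.pyRange ((if 1 < m then (1:Int) else 0) * 10 ^ (m.toNat - 1)) (10 ^ m.toNat) 1).filter
          (fun r => decide (pvWk m.toNat r = n)))
        (fun m hm => by
          rw [PySem.List.mem_pyRange_one] at hm
          exact pvBranch n m hm.1)
    rw [hbranches, pvUnion n k hk1]
    -- the A side
    rw [pvA_filter, pvIlog_toNat n hn, ← hkdef]
    -- split [0, 10^k) at start and at n+1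
    have hE := pvE_facts (k-1)
    have hone : (1:Int) ≤ 10 ^ (k-1) := one_le_pow₀ (by omega)
    have hstart_le : pvE (k-1) ≤ n + 1 := by
      by_cases h0 : n = 0
      · subst h0
        have hk1' : k = 1 := by rw [hkdef]; decide
        rw [hk1']
        have h0' : pvE 0 = 0 := by decide
        simp [h0']
      · have hlow : (10:Int) ^ (k-1) ≤ n := pvL_lower n (by omega)
        have : 9 * pvE (k-1) ≤ 9 * (10 ^ (k-1) - 1) := by rw [hE.1]; linarith
        omega
    have hsplit1 : PySem.List.pyRange 0 (10 ^ k) 1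
        = PySem.List.pyRange 0 (pvE (k-1)) 1 ++ PySem.List.pyRange (pvE (k-1)) (10 ^ k) 1 :=
      PySem.List.pyRange_one_append _ _ _ hE.2 (by omega)
    have hsplit2 : PySem.List.pyRange (pvE (k-1)) (10 ^ k) 1
        = PySem.List.pyRange (pvE (k-1)) (n + 1) 1 ++ PySem.List.pyRange (n + 1) (10 ^ k) 1 :=
      PySem.List.pyRange_one_append _ _ _ hstart_le (by omega)
    rw [hsplit1, hsplit2, List.filter_append, List.filter_append]
    have hnil1 : (PySem.List.pyRange 0 (pvE (k-1)) 1).filter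
        (fun i => decide (pvWk (pvL i) i = n)) = [] := by
      rw [List.filter_eq_nil_iff]
      intro i hi
      rw [PySem.List.mem_pyRange_one] at hi
      simp only [decide_eq_true_eq]
      by_cases hn0 : n = 0
      · exfalso
        have : pvE (k-1) = 0 := by
          have hk1' : k = 1 := by rw [hkdef, hn0]; decide
          rw [hk1']
          decide
        omega
      · exact pvBelowStart n i (by omega) hi.1 hi.2
    have hnil2 : (PySem.List.pyRange (n + 1) (10 ^ k) 1).filter
        (fun i => decide (pvWk (pvL i) i = n)) = [] := by
      rw [List.filter_eq_nil_iff]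
      intro i hi
      rw [PySem.List.mem_pyRange_one] at hi
      simp only [decide_eq_true_eq]
      exact pvWk_gt i n (by omega) (by omega)
    rw [hnil1, hnil2, List.nil_append, List.append_nil]
    apply List.filter_congr
    intro i hi
    rw [PySem.List.mem_pyRange_one] at hi
    have h0 : 0 ≤ i := le_trans hE.2 hi.1
    rw [pvSum_eq_wk i h0]

-- ===== VERDICT (by name: the statement is the Claim_ definition above) =====
theorem list_sum_trong_right_spec : Claim_equal_list_sum_trong_right := by
  intro n _
  unfold Spec_list_sum_trong_right
  exact pvMain n
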